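-- pv_equiv track=rewrite | github.com/eliottcassidy2000/math | 04-computation/seven_barrier_deep.py | independence_poly_mod
-- ===== SOURCE A (Python) =====
-- from itertools import permutations, combinations
--
-- def independence_poly_mod(cycles, p):
--     """Compute independence polynomial of conflict graph modulo p.
--     Two cycles conflict if they share a vertex."""
--     n_cycles = len(cycles)
--     if n_cycles == 0:
--         return [1]  # I(G,x) = 1
--
--     # Build conflict graph
--     adj = [[False]*n_cycles for _ in range(n_cycles)]
--     for i in range(n_cycles):
--         for j in range(i+1, n_cycles):
--             if cycles[i] & cycles[j]:  # share a vertex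
--                 adj[i][j] = adj[j][i] = True
--
--     # Count independent sets by size
--     max_indep = n_cycles
--     i_k = [0] * (max_indep + 1)
--     i_k[0] = 1
--
--     # Enumerate all independent sets (feasible for small n_cycles)
--     if n_cycles <= 20:
--         for size in range(1, n_cycles + 1):
--             for subset in combinations(range(n_cycles), size):
--                 # Check independence
--                 is_indep = True
--                 for a, b in combinations(subset, 2):
--                     if adj[a][b]:
--                         is_indep = False
--                         break
--                 if is_indep:
--                     i_k[size] += 1
--
--     # Reduce mod p
--     return [c % p for c in i_k]
-- ===== SOURCE B (Python) =====
-- def independence_poly_mod(cycles, p):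
--     """Independence polynomial of the conflict graph mod p, via the
--     vertex-branching recurrence I(G) = I(G - v) + x * I(G - N[v])
--     (keeping A's n > 20 feasibility cap, under which only the empty set is counted)."""
--     n = len(cycles)
--     if n == 0:
--         return [1]
--     if n > 20:
--         # replicate A's feasibility cap: the enumeration is skipped, only i_k[0] = 1
--         return [1 % p] + [0 % p] * n
--     sets = [set(c) for c in cycles]
--
--     def poly(idx):
--         # independence polynomial (coefficient list) of the graph induced on idx
--         if not idx:
--             return [1]
--         v, rest = idx[0], idx[1:]
--         without = poly(rest)
--         kept = [u for u in rest if not (sets[v] & sets[u])]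
--         withv = poly(kept)
--         out = [0] * max(len(without), len(withv) + 1)
--         for k, c in enumerate(without):
--             out[k] += c
--         for k, c in enumerate(withv):
--             out[k + 1] += c
--         return out
--
--     coeffs = poly(list(range(n)))
--     coeffs += [0] * (n + 1 - len(coeffs))
--     return [c % p for c in coeffs]
-- ===== Notes on version B (the rewrite author's own statement) =====
-- stated objective: faster
-- what changed: Replaces A's enumeration of every subset of each size (with a pairwise adjacency-matrix check per subset) by the vertex-branching independence-polynomial recurrence I(G) = I(G-v) + x*I(G-N[v]) over the conflict sets, keeping A's n > 20 feasibility cap; above the cap B also skips the conflict-matrix construction that A still performs.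
import Mathlib
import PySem

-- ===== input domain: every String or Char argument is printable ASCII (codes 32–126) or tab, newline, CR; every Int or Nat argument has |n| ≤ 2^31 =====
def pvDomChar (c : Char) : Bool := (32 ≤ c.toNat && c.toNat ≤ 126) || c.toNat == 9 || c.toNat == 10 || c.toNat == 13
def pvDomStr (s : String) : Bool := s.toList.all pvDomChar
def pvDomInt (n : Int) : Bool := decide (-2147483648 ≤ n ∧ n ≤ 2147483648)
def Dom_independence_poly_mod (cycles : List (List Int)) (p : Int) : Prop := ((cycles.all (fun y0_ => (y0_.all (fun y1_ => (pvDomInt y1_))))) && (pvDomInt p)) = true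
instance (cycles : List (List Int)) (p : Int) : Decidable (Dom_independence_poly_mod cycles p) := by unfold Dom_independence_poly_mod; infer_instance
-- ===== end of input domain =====

-- B replaces A's subset enumeration (all combinations of each size, pair-checked against an
-- adjacency matrix) by the vertex-branching independence-polynomial recurrence
-- I(G) = I(G - v) + x·I(G - N[v]), keeping A's n > 20 cap; equal return value is proved.

-- ===== PORT A =====

-- itertools.combinations, in itertools' lexicographic order
def pvCombos {α : Type} : Nat → List α → List (List α)
  | 0, _ => [[]]
  | _+1, [] => []
  | k+1, x::xs => (pvCombos k xs).map (x :: ·) ++ pvCombos (k+1) xs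

-- adj[i][j] read / the one-sided write adj[i][j] = True
def pvAdjGet (m : List (List Bool)) (i j : Nat) : Bool := (m.getD i []).getD j false
def pvAdjSet (m : List (List Bool)) (i j : Nat) : List (List Bool) :=
  m.set i ((m.getD i []).set j true)

-- the conflict-graph adjacency matrix (A's double loop; `cycles[i] & cycles[j]` truthiness
-- is nonemptiness of the set intersection — the parameters are Python sets)
def pvBuildAdj (cycles : List (List Int)) (n : Nat) : List (List Bool) :=
  (PySem.List.pyRange 0 (n : Int) 1).foldl (fun adj i =>
    (PySem.List.pyRange (i + 1) (n : Int) 1).foldl (fun adj j =>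
      if PySem.Set.inter (cycles.getD i.toNat []) (cycles.getD j.toNat []) ≠ [] then
        pvAdjSet (pvAdjSet adj i.toNat j.toNat) j.toNat i.toNat
      else adj) adj) (List.replicate n (List.replicate n false))

-- the i_k counting loops (sizes 1..n, combinations of each size, pairwise adj check)
def pvCountIK (adj : List (List Bool)) (n : Nat) : List Int :=
  (PySem.List.pyRange 1 ((n : Int) + 1) 1).foldl (fun ik size =>
    (pvCombos size.toNat (PySem.List.pyRange 0 (n : Int) 1)).foldl (fun ik subset =>
      if (pvCombos 2 subset).all (fun pr =>
          !pvAdjGet adj (pr.getD 0 0).toNat (pr.getD 1 0).toNat) then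
        ik.set size.toNat (ik.getD size.toNat 0 + 1)
      else ik) ik)
    ((List.replicate (n + 1) (0 : Int)).set 0 1)

def independence_poly_mod (cycles : List (List Int)) (p : Int) : List Int :=
  let n := cycles.length
  if n = 0 then [1]
  else
    let adj := pvBuildAdj cycles n
    let ik := if n ≤ 20 then pvCountIK adj n else (List.replicate (n + 1) (0 : Int)).set 0 1
    ik.map (fun c => PySem.Int.mod c p)

-- ===== PORT B =====

-- poly(idx): independence polynomial of the conflict graph induced on idx
def pvPolyB (sets : List (PySem.Set Int)) : List Nat → List Int
  | [] => [1]
  | v :: rest =>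
    let without := pvPolyB sets rest
    let kept := rest.filter (fun u => PySem.Set.inter (sets.getD v []) (sets.getD u []) = [])
    let withv := pvPolyB sets kept
    let out : List Int := List.replicate (max without.length (withv.length + 1)) 0
    let out := without.zipIdx.foldl (fun o cz => o.set cz.2 (o.getD cz.2 0 + cz.1)) out
    withv.zipIdx.foldl (fun o cz => o.set (cz.2 + 1) (o.getD (cz.2 + 1) 0 + cz.1)) out
  termination_by l => l.length
  decreasing_by
    · simp
    · simp only [List.length_unattach]
      exact Nat.lt_succ_of_le (le_trans (List.length_filter_le _ _) (by simp))

def independence_poly_mod_alt (cycles : List (List Int)) (p : Int) : List Int :=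
  let n := cycles.length
  if n = 0 then [1]
  else if 20 < n then
    PySem.Int.mod 1 p :: List.replicate n (PySem.Int.mod 0 p)
  else
    let sets := cycles.map (fun c => PySem.Set.ofList c)
    let coeffs := pvPolyB sets (List.range n)
    let coeffs := coeffs ++ List.replicate (n + 1 - coeffs.length) 0
    coeffs.map (fun c => PySem.Int.mod c p)

-- ===== PRECONDITION & SPEC =====
-- Pre_ excludes only p = 0 with a nonempty cycles list, where A's `c % p` raises ZeroDivisionError.
def Pre_independence_poly_mod (cycles : List (List Int)) (p : Int) : Prop :=
  cycles = [] ∨ p ≠ 0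
instance (cycles : List (List Int)) (p : Int) : Decidable (Pre_independence_poly_mod cycles p) := by
  unfold Pre_independence_poly_mod; infer_instance

def pvWitness_independence_poly_mod : List (List Int) × Int := ([[1, 2], [2, 3]], 5)

def Spec_independence_poly_mod (cycles : List (List Int)) (p : Int) (out : List Int) : Prop := out = independence_poly_mod_alt cycles p
instance (cycles : List (List Int)) (p : Int) (out : List Int) : Decidable (Spec_independence_poly_mod cycles p out) := by unfold Spec_independence_poly_mod; infer_instance

-- ===== CLAIM (what is proved, stated in full; the proofs are below) =====
def Claim_equal_independence_poly_mod : Prop := ∀ (cycles : List (List Int)) (p : Int), Dom_independence_poly_mod cycles p → Pre_independence_poly_mod cycles p → Spec_independence_poly_mod cycles p (independence_poly_mod cycles p)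

-- ===== LEMMAS AND PROOFS =====

-- the shared conflict relation and the common count "independent k-element sublists of idx"
def pvShare (cycles : List (List Int)) (a b : Nat) : Bool :=
  decide (∃ x, x ∈ cycles.getD a [] ∧ x ∈ cycles.getD b [])

def pvIndep (cycles : List (List Int)) (l : List Nat) : Bool :=
  decide (l.Pairwise (fun a b => pvShare cycles a b = false))

def pvCnt (cycles : List (List Int)) (idx : List Nat) (k : Nat) : Nat :=
  (pvCombos k idx).countP (pvIndep cycles)

lemma pvCnt_zero (cycles : List (List Int)) (idx : List Nat) : pvCnt cycles idx 0 = 1 := by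
  simp [pvCnt, pvCombos, pvIndep]

-- ---- generic facts about pvCombos ----
lemma pvCombos_one {α : Type} (xs : List α) : pvCombos 1 xs = xs.map (fun x => [x]) := by
  induction xs with
  | nil => rfl
  | cons x t ih => simp [pvCombos, ih]

lemma pvCombos_map {α β : Type} (f : α → β) (k : Nat) (xs : List α) :
    pvCombos k (xs.map f) = (pvCombos k xs).map (List.map f) := by
  induction xs generalizing k with
  | nil => cases k <;> rfl
  | cons x t ih =>
    cases k with
    | zero => rfl
    | succ k => simp [pvCombos, ih, Function.comp]

lemma pvCombos_filter {α : Type} (p : α → Bool) (k : Nat) (xs : List α) :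
    pvCombos k (xs.filter p) = (pvCombos k xs).filter (fun l => l.all p) := by
  induction xs generalizing k with
  | nil => cases k <;> rfl
  | cons x t ih =>
    cases k with
    | zero => simp [pvCombos]
    | succ k =>
      by_cases hx : p x = true
      · simp only [List.filter_cons, hx, if_pos, pvCombos, ih, List.filter_append,
          List.filter_map]
        refine congrArg₂ _ (congrArg _ ?_) rfl
        exact (List.filter_congr (fun l _ => by simp [Function.comp, hx])).symm
      · simp only [List.filter_cons, hx, Bool.false_eq_true, if_false, pvCombos,
          List.filter_append, List.filter_map]
        rw [show List.filter ((fun l => l.all p) ∘ fun l => x :: l) (pvCombos k t) = []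
            from List.filter_eq_nil_iff.mpr (fun l _ => by simp [Function.comp, hx]), ih]
        simp
  
lemma pvCombos_sublist {α : Type} {k : Nat} {xs l : List α} (h : l ∈ pvCombos k xs) :
    l.Sublist xs := by
  induction xs generalizing k l with
  | nil => cases k <;> simp_all [pvCombos]
  | cons x t ih =>
    cases k with
    | zero => simp_all [pvCombos]
    | succ k =>
      simp only [pvCombos, List.mem_append, List.mem_map] at h
      rcases h with ⟨l', hl', rfl⟩ | h
      · exact (ih hl').cons₂ x
      · exact (ih h).cons x

lemma pvCombos_two_all {α : Type} (q : List α → Bool) (l : List α) :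
    ((pvCombos 2 l).all q = true) ↔ l.Pairwise (fun a b => q [a, b] = true) := by
  induction l with
  | nil => simp [pvCombos]
  | cons x t ih =>
    simp [pvCombos, pvCombos_one, List.all_append, ih, List.pairwise_cons, and_comm]

-- ---- the intersection tests express pvShare ----
lemma pvInter_ne_nil (c d : List Int) :
    (PySem.Set.inter c d ≠ []) ↔ ∃ x, x ∈ c ∧ x ∈ d := by
  rw [Ne, List.eq_nil_iff_forall_not_mem]
  push_neg
  simp [PySem.Set.mem_inter]

lemma pvInter_ofList_nil (c d : List Int) :
    (PySem.Set.inter (PySem.Set.ofList c) (PySem.Set.ofList d) = []) ↔ ¬ ∃ x, x ∈ c ∧ x ∈ d := by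
  rw [List.eq_nil_iff_forall_not_mem]
  constructor
  · rintro h ⟨x, h1, h2⟩
    exact h x ((PySem.Set.mem_inter _ _ x).mpr
      ⟨(PySem.Set.mem_ofList c x).mpr h1, (PySem.Set.mem_ofList d x).mpr h2⟩)
  · intro h x hx
    obtain ⟨h1, h2⟩ := (PySem.Set.mem_inter _ _ x).mp hx
    exact h ⟨x, (PySem.Set.mem_ofList c x).mp h1, (PySem.Set.mem_ofList d x).mp h2⟩

lemma pvSets_getD (cycles : List (List Int)) (a : Nat) :
    (cycles.map (fun c => PySem.Set.ofList c)).getD a [] = PySem.Set.ofList (cycles.getD a []) := by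
  rcases lt_or_ge a cycles.length with h | h
  · rw [List.getD_eq_getElem _ _ (by simpa using h), List.getD_eq_getElem _ _ h]
    simp
  · rw [List.getD_eq_default _ _ (by simpa using h), List.getD_eq_default _ _ h]
    rfl

lemma pvShare_iff (cycles : List (List Int)) (a b : Nat) :
    pvShare cycles a b = true ↔ ∃ x, x ∈ cycles.getD a [] ∧ x ∈ cycles.getD b [] := by
  simp [pvShare]

lemma pvShare_symm {cycles : List (List Int)} {a b : Nat} (h : pvShare cycles a b = true) :
    pvShare cycles b a = true := by
  rw [pvShare_iff] at h ⊢
  obtain ⟨x, h1, h2⟩ := h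
  exact ⟨x, h2, h1⟩

-- ---- A side: the adjacency matrix ----
lemma pvGetD_set {α : Type} (l : List α) (i j : Nat) (v d : α) :
    (l.set i v).getD j d = if j = i ∧ i < l.length then v else l.getD j d := by
  rw [List.getD_eq_getElem?_getD, List.getElem?_set, List.getD_eq_getElem?_getD]
  by_cases h1 : i = j
  · subst h1
    by_cases h2 : i < l.length <;> simp [h2]
  · have h2 : ¬(j = i ∧ i < l.length) := fun h => h1 h.1.symm
    simp [h1, h2]

lemma pvAdjGet_adjSet (m : List (List Bool)) (i j a b : Nat) :
    pvAdjGet (pvAdjSet m i j) a b =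
      if a = i ∧ b = j ∧ i < m.length ∧ j < (m.getD i []).length then true
      else pvAdjGet m a b := by
  unfold pvAdjGet pvAdjSet
  rw [pvGetD_set]
  by_cases ha : a = i ∧ i < m.length
  · rw [if_pos ha, pvGetD_set]
    obtain ⟨rfl, hlen⟩ := ha
    by_cases hb : b = j ∧ j < (m.getD a []).length
    · simp [hb.1, hb.2, hlen]
    · rw [if_neg hb, if_neg (by tauto)]
  · rw [if_neg ha, if_neg (by tauto)]

def pvAdjShape (n : Nat) (m : List (List Bool)) : Prop :=
  m.length = n ∧ ∀ r ∈ m, r.length = n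

def pvStep (cycles : List (List Int)) (adj : List (List Bool)) (q : Int × Int) : List (List Bool) :=
  if PySem.Set.inter (cycles.getD q.1.toNat []) (cycles.getD q.2.toNat []) ≠ [] then
    pvAdjSet (pvAdjSet adj q.1.toNat q.2.toNat) q.2.toNat q.1.toNat
  else adj

def pvPairs (n : Nat) : List (Int × Int) :=
  (PySem.List.pyRange 0 (n : Int) 1).flatMap (fun i =>
    (PySem.List.pyRange (i + 1) (n : Int) 1).map (fun j => (i, j)))

lemma pvBuildAdj_eq (cycles : List (List Int)) (n : Nat) :
    pvBuildAdj cycles n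
      = (pvPairs n).foldl (pvStep cycles) (List.replicate n (List.replicate n false)) := by
  unfold pvBuildAdj pvPairs pvStep
  rw [List.foldl_flatMap]
  simp [List.foldl_map]

lemma pvRow_len {n : Nat} {m : List (List Bool)} (hm : pvAdjShape n m) {i : Nat} (hi : i < n) :
    (m.getD i []).length = n := by
  have h1 := hm.1
  rw [List.getD_eq_getElem _ _ (by omega)]
  exact hm.2 _ (List.getElem_mem _)

lemma pvAdjShape_adjSet {n : Nat} {m : List (List Bool)} (hm : pvAdjShape n m)
    {i : Nat} (j : Nat) (hi : i < n) : pvAdjShape n (pvAdjSet m i j) := by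
  refine ⟨by simp [pvAdjSet, hm.1], ?_⟩
  intro r hr
  rcases List.mem_or_eq_of_mem_set hr with h | rfl
  · exact hm.2 r h
  · rw [List.length_set]
    exact pvRow_len hm hi

lemma pvAdjGet_adjSet' {n : Nat} {m : List (List Bool)} (hm : pvAdjShape n m)
    {i j : Nat} (hi : i < n) (hj : j < n) (a b : Nat) :
    pvAdjGet (pvAdjSet m i j) a b = if a = i ∧ b = j then true else pvAdjGet m a b := by
  rw [pvAdjGet_adjSet]
  have hlen : i < m.length := by have := hm.1; omega
  have hrow : (m.getD i []).length = n := pvRow_len hm hi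
  by_cases h : a = i ∧ b = j
  · rw [if_pos ⟨h.1, h.2, hlen, by omega⟩, if_pos h]
  · rw [if_neg (by tauto), if_neg h]

lemma pvShape_step {cycles : List (List Int)} {n : Nat} {m : List (List Bool)}
    (hm : pvAdjShape n m) {q : Int × Int} (h1 : q.1.toNat < n) (h2 : q.2.toNat < n) :
    pvAdjShape n (pvStep cycles m q) := by
  unfold pvStep
  split_ifs
  · exact pvAdjShape_adjSet (pvAdjShape_adjSet hm q.2.toNat h1) q.1.toNat h2
  · exact hm

lemma pvStep_adjGet {cycles : List (List Int)} {n : Nat} {m : List (List Bool)}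
    (hm : pvAdjShape n m) {q : Int × Int} (h1 : q.1.toNat < n) (h2 : q.2.toNat < n) (a b : Nat) :
    pvAdjGet (pvStep cycles m q) a b =
      (pvAdjGet m a b || (pvShare cycles q.1.toNat q.2.toNat &&
        ((q.1.toNat == a && q.2.toNat == b) || (q.1.toNat == b && q.2.toNat == a)))) := by
  unfold pvStep
  have hiff : (PySem.Set.inter (cycles.getD q.1.toNat []) (cycles.getD q.2.toNat []) ≠ [])
      ↔ pvShare cycles q.1.toNat q.2.toNat = true :=
    (pvInter_ne_nil _ _).trans (pvShare_iff _ _ _).symm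
  by_cases hsh : pvShare cycles q.1.toNat q.2.toNat = true
  · rw [if_pos (hiff.mpr hsh),
      pvAdjGet_adjSet' (pvAdjShape_adjSet hm q.2.toNat h1) h2 h1,
      pvAdjGet_adjSet' hm h1 h2]
    by_cases hx : a = q.2.toNat ∧ b = q.1.toNat
    · simp [hx.1, hx.2, hsh]
    · by_cases hy : a = q.1.toNat ∧ b = q.2.toNat
      · simp [hy.1, hy.2, hsh]
      · rw [if_neg hx, if_neg hy]
        have e1 : (q.1.toNat == a && q.2.toNat == b) = false := by
          simp only [Bool.and_eq_false_iff, beq_eq_false_iff_ne, ne_eq]; tauto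
        have e2 : (q.1.toNat == b && q.2.toNat == a) = false := by
          simp only [Bool.and_eq_false_iff, beq_eq_false_iff_ne, ne_eq]; tauto
        simp [e1, e2]
  · rw [if_neg (fun h => hsh (hiff.mp h))]
    have hf : pvShare cycles q.1.toNat q.2.toNat = false := by
      cases hx : pvShare cycles q.1.toNat q.2.toNat
      · rfl
      · exact absurd hx hsh
    simp [hf]

lemma pvFoldPairs_adjGet (cycles : List (List Int)) (n : Nat) (ps : List (Int × Int))
    (m : List (List Bool)) (hm : pvAdjShape n m)
    (hps : ∀ q ∈ ps, q.1.toNat < n ∧ q.2.toNat < n) (a b : Nat) :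
    pvAdjGet (ps.foldl (pvStep cycles) m) a b =
      (pvAdjGet m a b ||
        ps.any (fun q => pvShare cycles q.1.toNat q.2.toNat &&
          ((q.1.toNat == a && q.2.toNat == b) || (q.1.toNat == b && q.2.toNat == a)))) := by
  induction ps generalizing m with
  | nil => simp
  | cons q ps ih =>
    have hq := hps q (List.mem_cons_self ..)
    have hm' : pvAdjShape n (pvStep cycles m q) := pvShape_step hm hq.1 hq.2
    rw [List.foldl_cons, ih _ hm' (fun r hr => hps r (List.mem_cons_of_mem _ hr)),
      List.any_cons, pvStep_adjGet hm hq.1 hq.2, Bool.or_assoc]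

lemma pvMem_pairs (n : Nat) (q : Int × Int) :
    q ∈ pvPairs n ↔ 0 ≤ q.1 ∧ q.1 < q.2 ∧ q.2 < (n : Int) := by
  obtain ⟨i, j⟩ := q
  unfold pvPairs
  simp only [List.mem_flatMap, List.mem_map, PySem.List.mem_pyRange_one, Prod.mk.injEq]
  constructor
  · rintro ⟨i', ⟨hi1, hi2⟩, j', ⟨hj1, hj2⟩, rfl, rfl⟩
    exact ⟨hi1, by omega, hj2⟩
  · rintro ⟨h1, h2, h3⟩
    exact ⟨i, ⟨h1, by omega⟩, j, ⟨by omega, h3⟩, rfl, rfl⟩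

lemma pvAdjGet_replicate (n a b : Nat) :
    pvAdjGet (List.replicate n (List.replicate n false)) a b = false := by
  unfold pvAdjGet
  have hrow : (List.replicate n (List.replicate n false)).getD a [] = List.replicate n false ∨
      (List.replicate n (List.replicate n false)).getD a [] = [] := by
    rcases Nat.lt_or_ge a n with ha | ha
    · left
      rw [List.getD_eq_getElem _ _ (by simpa using ha)]
      exact List.getElem_replicate ..
    · exact Or.inr (List.getD_eq_default _ _ (by simpa using ha))
  rcases hrow with h | h <;> rw [h]
  · rcases Nat.lt_or_ge b n with hb | hb
    · rw [List.getD_eq_getElem _ _ (by simpa using hb)]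
      exact List.getElem_replicate ..
    · exact List.getD_eq_default _ _ (by simpa using hb)
  · rfl

lemma pvBuildAdj_spec (cycles : List (List Int)) (n : Nat) (a b : Nat) :
    pvAdjGet (pvBuildAdj cycles n) a b =
      decide (a < n ∧ b < n ∧ a ≠ b ∧ pvShare cycles a b = true) := by
  rw [pvBuildAdj_eq]
  have hshape : pvAdjShape n (List.replicate n (List.replicate n false)) := by
    refine ⟨by simp, fun r hr => ?_⟩
    rw [List.eq_of_mem_replicate hr]
    simp
  have hps : ∀ q ∈ pvPairs n, q.1.toNat < n ∧ q.2.toNat < n := by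
    intro q hq
    rw [pvMem_pairs] at hq
    omega
  rw [pvFoldPairs_adjGet cycles n _ _ hshape hps, pvAdjGet_replicate, Bool.false_or]
  by_cases hP : a < n ∧ b < n ∧ a ≠ b ∧ pvShare cycles a b = true
  · rw [decide_eq_true hP, List.any_eq_true]
    obtain ⟨ha, hb, hne, hsh⟩ := hP
    rcases Nat.lt_or_ge a b with hlt | hge
    · refine ⟨((a : Int), (b : Int)), (pvMem_pairs n _).mpr ⟨by omega, by omega, by omega⟩, ?_⟩
      simp [hsh]
    · refine ⟨((b : Int), (a : Int)), (pvMem_pairs n _).mpr ⟨by omega, by omega, by omega⟩, ?_⟩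
      simp [pvShare_symm hsh]
  · rw [decide_eq_false hP, List.any_eq_false]
    intro q hq hpq
    rw [pvMem_pairs] at hq
    simp only [Bool.and_eq_true, Bool.or_eq_true, beq_iff_eq, decide_eq_true_eq] at hpq
    obtain ⟨hsh, hor⟩ := hpq
    rcases hor with ⟨h1, h2⟩ | ⟨h1, h2⟩
    · exact hP ⟨by omega, by omega, by omega, h1 ▸ h2 ▸ hsh⟩
    · exact hP ⟨by omega, by omega, by omega, pvShare_symm (h1 ▸ h2 ▸ hsh)⟩

lemma pvFold_count (L : List (List Int)) (c : List Int → Bool) (ik : List Int) (s : Nat)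
    (hs : s < ik.length) :
    L.foldl (fun ik x => if c x then ik.set s (ik.getD s 0 + 1) else ik) ik
      = ik.set s (ik.getD s 0 + (L.countP c : Int)) := by
  induction L generalizing ik with
  | nil =>
    simp only [List.foldl_nil, List.countP_nil, Nat.cast_zero, add_zero]
    refine (List.ext_getElem (by simp) ?_).symm
    intro i h1 h2
    rw [List.getElem_set]
    split_ifs with h
    · subst h
      rw [List.getD_eq_getElem _ _ hs]
    · rfl
  | cons x t ih =>
    by_cases hc : c x = true
    · simp only [List.foldl_cons, hc, if_pos, List.countP_cons]
      rw [ih _ (by simpa using hs), List.set_set, pvGetD_set, if_pos ⟨rfl, by simpa using hs⟩]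
      congr 1
      simp [hc]
      push_cast
      ring
    · simp only [List.foldl_cons, hc, Bool.false_eq_true, if_false, List.countP_cons]
      rw [ih _ hs]
      simp [hc]

lemma pvCntA_eq (cycles : List (List Int)) (n k : Nat) :
    (pvCombos k (PySem.List.pyRange 0 (n : Int) 1)).countP (fun subset =>
      (pvCombos 2 subset).all (fun pr =>
        !pvAdjGet (pvBuildAdj cycles n) (pr.getD 0 0).toNat (pr.getD 1 0).toNat))
    = pvCnt cycles (List.range n) k := by
  rw [PySem.List.pyRange_zero_nat, pvCombos_map, List.countP_map]
  unfold pvCnt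
  apply List.countP_congr
  intro l hl
  have hsub := pvCombos_sublist hl
  have hlt : l.Pairwise (· < ·) := List.Pairwise.sublist hsub List.pairwise_lt_range
  have hbnd : ∀ x ∈ l, x < n := fun x hx => List.mem_range.mp (hsub.subset hx)
  simp only [Function.comp]
  rw [pvCombos_map, List.all_map, pvCombos_two_all]
  unfold pvIndep
  rw [decide_eq_true_eq]
  rw [List.pairwise_iff_getElem, List.pairwise_iff_getElem] at *
  constructor
  · intro h i j hi hj hij
    have := h i j hi hj hij
    simp only [Function.comp, List.map_cons, List.map_nil, List.getD_cons_zero,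
      List.getD_cons_succ, Int.toNat_natCast, Bool.not_eq_eq_eq_not, Bool.not_true,
      pvBuildAdj_spec, decide_eq_false_iff_not] at this
    cases hx : pvShare cycles l[i] l[j] with
    | false => rfl
    | true =>
      exact absurd ⟨hbnd _ (List.getElem_mem hi), hbnd _ (List.getElem_mem hj),
        by have := hlt i j hi hj hij; omega, hx⟩ this
  · intro h i j hi hj hij
    have := h i j hi hj hij
    simp only [Function.comp, List.map_cons, List.map_nil, List.getD_cons_zero,
      List.getD_cons_succ, Int.toNat_natCast, Bool.not_eq_eq_eq_not, Bool.not_true,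
      pvBuildAdj_spec, decide_eq_false_iff_not]
    intro hP
    simp [this] at hP

lemma pvIK_loop (cycles : List (List Int)) (n : Nat) (s : Nat) (hs : s ≤ n) :
    ((PySem.List.pyRange 1 ((s : Int) + 1) 1).foldl (fun ik size =>
      (pvCombos size.toNat (PySem.List.pyRange 0 (n : Int) 1)).foldl (fun ik subset =>
        if (pvCombos 2 subset).all (fun pr =>
            !pvAdjGet (pvBuildAdj cycles n) (pr.getD 0 0).toNat (pr.getD 1 0).toNat) then
          ik.set size.toNat (ik.getD size.toNat 0 + 1)
        else ik) ik)
      ((List.replicate (n + 1) (0 : Int)).set 0 1)).length = n + 1 ∧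
    ∀ k, ((PySem.List.pyRange 1 ((s : Int) + 1) 1).foldl (fun ik size =>
      (pvCombos size.toNat (PySem.List.pyRange 0 (n : Int) 1)).foldl (fun ik subset =>
        if (pvCombos 2 subset).all (fun pr =>
            !pvAdjGet (pvBuildAdj cycles n) (pr.getD 0 0).toNat (pr.getD 1 0).toNat) then
          ik.set size.toNat (ik.getD size.toNat 0 + 1)
        else ik) ik)
      ((List.replicate (n + 1) (0 : Int)).set 0 1)).getD k 0 =
      if k = 0 then 1 else if k ≤ s then (pvCnt cycles (List.range n) k : Int) else 0 := by
  induction s with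
  | zero =>
    rw [show ((0 : Nat) : Int) + 1 = 1 by norm_num,
      PySem.List.pyRange_one_eq_nil (a := 1) (b := 1) (by norm_num)]
    simp only [List.foldl_nil]
    refine ⟨by simp, fun k => ?_⟩
    rw [pvGetD_set]
    by_cases hk : k = 0
    · simp [hk]
    · rw [if_neg (by tauto), if_neg hk, if_neg (by omega)]
      rcases Nat.lt_or_ge k (n + 1) with h | h
      · rw [List.getD_eq_getElem _ _ (by simpa using h), List.getElem_replicate]
      · rw [List.getD_eq_default _ _ (by simpa using h)]
  | succ s ihs =>
    obtain ⟨ihlen, ihget⟩ := ihs (by omega)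
    set P := (PySem.List.pyRange 1 ((s : Int) + 1) 1).foldl (fun ik size =>
      (pvCombos size.toNat (PySem.List.pyRange 0 (n : Int) 1)).foldl (fun ik subset =>
        if (pvCombos 2 subset).all (fun pr =>
            !pvAdjGet (pvBuildAdj cycles n) (pr.getD 0 0).toNat (pr.getD 1 0).toNat) then
          ik.set size.toNat (ik.getD size.toNat 0 + 1)
        else ik) ik)
      ((List.replicate (n + 1) (0 : Int)).set 0 1) with hP
    have hsplit : PySem.List.pyRange 1 (((s + 1 : Nat) : Int) + 1) 1
        = PySem.List.pyRange 1 ((s : Int) + 1) 1 ++ [(s : Int) + 1] := by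
      rw [show (((s + 1 : Nat) : Int) + 1) = ((s : Int) + 1) + 1 by push_cast; ring]
      exact PySem.List.pyRange_one_succ_right (by omega)
    rw [hsplit, List.foldl_append, ← hP]
    simp only [List.foldl_cons, List.foldl_nil]
    rw [show ((s : Int) + 1).toNat = s + 1 by omega]
    rw [pvFold_count _ _ _ _ (show s + 1 < P.length by rw [ihlen]; omega), pvCntA_eq]
    constructor
    · rw [List.length_set, ihlen]
    · intro k
      rw [pvGetD_set, ihlen]
      by_cases hk : k = s + 1
      · subst hk
        rw [if_pos ⟨rfl, by omega⟩, ihget (s + 1)]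
        rw [if_neg (show ¬(s + 1 = 0) by omega), if_neg (show ¬(s + 1 ≤ s) by omega),
          if_neg (show ¬(s + 1 = 0) by omega), if_pos (Nat.le_refl (s + 1))]
        omega
      · rw [if_neg (by tauto), ihget k]
        split_ifs <;> first | rfl | omega

lemma pvCountIK_spec (cycles : List (List Int)) (n : Nat) :
    (pvCountIK (pvBuildAdj cycles n) n).length = n + 1 ∧
    ∀ k, k ≤ n → (pvCountIK (pvBuildAdj cycles n) n).getD k 0
      = (pvCnt cycles (List.range n) k : Int) := by
  obtain ⟨hlen, hget⟩ := pvIK_loop cycles n n le_rfl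
  refine ⟨hlen, fun k hk => ?_⟩
  rw [show pvCountIK (pvBuildAdj cycles n) n = (PySem.List.pyRange 1 ((n : Int) + 1) 1).foldl
      (fun ik size =>
        (pvCombos size.toNat (PySem.List.pyRange 0 (n : Int) 1)).foldl (fun ik subset =>
          if (pvCombos 2 subset).all (fun pr =>
              !pvAdjGet (pvBuildAdj cycles n) (pr.getD 0 0).toNat (pr.getD 1 0).toNat) then
            ik.set size.toNat (ik.getD size.toNat 0 + 1)
          else ik) ik)
      ((List.replicate (n + 1) (0 : Int)).set 0 1) from rfl, hget k]
  by_cases hk0 : k = 0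
  · rw [if_pos hk0, hk0, pvCnt_zero]
    norm_num
  · rw [if_neg hk0, if_pos hk]

-- ---- B side: the recurrence ----
lemma pvCnt_cons (cycles : List (List Int)) (v : Nat) (rest : List Nat) (k : Nat) :
    pvCnt cycles (v :: rest) (k + 1) =
      pvCnt cycles rest (k + 1) +
      pvCnt cycles (rest.filter (fun u => !pvShare cycles v u)) k := by
  unfold pvCnt
  show ((pvCombos k rest).map (v :: ·) ++ pvCombos (k + 1) rest).countP _ = _
  rw [List.countP_append, List.countP_map, pvCombos_filter, List.countP_filter]
  rw [Nat.add_comm]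
  congr 1
  apply List.countP_congr
  intro l _
  simp only [Function.comp, pvIndep, List.pairwise_cons, decide_eq_true_eq, Bool.and_eq_true,
    List.all_eq_true, Bool.not_eq_eq_eq_not, Bool.not_true, decide_eq_false_iff_not]
  tauto

lemma pvFold_add (w : List Int) (off s : Nat) (o : List Int)
    (hb : s + off + w.length ≤ o.length) :
    ((w.zipIdx s).foldl (fun o cz => o.set (cz.2 + off) (o.getD (cz.2 + off) 0 + cz.1)) o).length = o.length ∧
    ∀ j, ((w.zipIdx s).foldl (fun o cz => o.set (cz.2 + off) (o.getD (cz.2 + off) 0 + cz.1)) o).getD j 0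
      = o.getD j 0 + (if s + off ≤ j ∧ j < s + off + w.length then w.getD (j - s - off) 0 else 0) := by
  induction w generalizing s o with
  | nil =>
    refine ⟨by simp, fun j => ?_⟩
    rw [if_neg (show ¬(s + off ≤ j ∧ j < s + off + ([] : List Int).length) by
      simp only [List.length_nil]; omega)]
    simp
  | cons x t ih =>
    simp only [List.length_cons] at hb
    rw [List.zipIdx_cons, List.foldl_cons]
    have hlen : (o.set (s + off) (o.getD (s + off) 0 + x)).length = o.length := by simp
    obtain ⟨ihl, ihg⟩ := ih (s + 1) (o.set (s + off) (o.getD (s + off) 0 + x))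
      (by rw [hlen]; omega)
    refine ⟨by rw [ihl, hlen], fun j => ?_⟩
    rw [ihg j, pvGetD_set]
    have hso : s + off < o.length := by omega
    by_cases hj : j = s + off
    · subst hj
      rw [if_pos ⟨rfl, hso⟩, if_neg (show ¬(s + 1 + off ≤ s + off ∧ _) by omega),
        if_pos (show s + off ≤ s + off ∧ s + off < s + off + (x :: t).length by
          simp only [List.length_cons]; omega)]
      have h0 : s + off - s - off = 0 := by omega
      rw [h0, List.getD_cons_zero]
      ring
    · rw [if_neg (show ¬(j = s + off ∧ s + off < o.length) by tauto)]
      by_cases hwin : s + 1 + off ≤ j ∧ j < s + 1 + off + t.length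
      · rw [if_pos hwin, if_pos (show s + off ≤ j ∧ j < s + off + (x :: t).length by
          simp only [List.length_cons]; omega)]
        have h1 : j - s - off = (j - (s + 1) - off) + 1 := by omega
        rw [h1, List.getD_cons_succ]
      · rw [if_neg hwin, if_neg (show ¬(s + off ≤ j ∧ j < s + off + (x :: t).length) by
          simp only [List.length_cons]; omega)]

lemma pvPolyB_spec (cycles : List (List Int)) (idx : List Nat) :
    1 ≤ (pvPolyB (cycles.map (fun c => PySem.Set.ofList c)) idx).length ∧
    (pvPolyB (cycles.map (fun c => PySem.Set.ofList c)) idx).length ≤ idx.length + 1 ∧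
    ∀ k, (pvPolyB (cycles.map (fun c => PySem.Set.ofList c)) idx).getD k 0 = (pvCnt cycles idx k : Int) := by
  suffices H : ∀ (N : Nat) (idx : List Nat), idx.length ≤ N →
      1 ≤ (pvPolyB (cycles.map (fun c => PySem.Set.ofList c)) idx).length ∧
      (pvPolyB (cycles.map (fun c => PySem.Set.ofList c)) idx).length ≤ idx.length + 1 ∧
      ∀ k, (pvPolyB (cycles.map (fun c => PySem.Set.ofList c)) idx).getD k 0
        = (pvCnt cycles idx k : Int) by
    exact H idx.length idx le_rfl
  intro N
  induction N with
  | zero =>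
    intro idx hlen
    rw [show idx = [] from List.length_eq_zero_iff.mp (by omega)]
    refine ⟨by simp [pvPolyB], by simp [pvPolyB], fun k => ?_⟩
    cases k with
    | zero => simp [pvPolyB, pvCnt_zero]
    | succ k => simp [pvPolyB, pvCnt, pvCombos]
  | succ N ihN =>
    intro idx hlen
    cases idx with
    | nil =>
      refine ⟨by simp [pvPolyB], by simp [pvPolyB], fun k => ?_⟩
      cases k with
      | zero => simp [pvPolyB, pvCnt_zero]
      | succ k => simp [pvPolyB, pvCnt, pvCombos]
    | cons v rest =>
      obtain ⟨hwo1, hwo2, hwog⟩ := ihN rest (by simp only [List.length_cons] at hlen; omega)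
      have hkeq : rest.filter (fun u =>
            PySem.Set.inter ((cycles.map (fun c => PySem.Set.ofList c)).getD v [])
              ((cycles.map (fun c => PySem.Set.ofList c)).getD u []) = [])
          = rest.filter (fun u => !pvShare cycles v u) := by
        apply List.filter_congr
        intro u _
        have hiff : (PySem.Set.inter ((cycles.map (fun c => PySem.Set.ofList c)).getD v [])
            ((cycles.map (fun c => PySem.Set.ofList c)).getD u []) = [])
            ↔ ¬ (pvShare cycles v u = true) := by
          rw [pvSets_getD, pvSets_getD, pvInter_ofList_nil, pvShare_iff]
        rw [show (!pvShare cycles v u) = decide (¬ (pvShare cycles v u = true)) by simp]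
        exact decide_eq_decide.mpr hiff
      obtain ⟨hwi1, hwi2, hwig⟩ := ihN (rest.filter (fun u =>
            PySem.Set.inter ((cycles.map (fun c => PySem.Set.ofList c)).getD v [])
              ((cycles.map (fun c => PySem.Set.ofList c)).getD u []) = []))
        (by have := List.length_filter_le (fun u =>
              PySem.Set.inter ((cycles.map (fun c => PySem.Set.ofList c)).getD v [])
                ((cycles.map (fun c => PySem.Set.ofList c)).getD u []) = []) rest
            simp only [List.length_cons] at hlen; omega)
      simp only [pvPolyB]
      set wo := pvPolyB (cycles.map (fun c => PySem.Set.ofList c)) rest with hwo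
      set wi := pvPolyB (cycles.map (fun c => PySem.Set.ofList c)) (rest.filter (fun u =>
        PySem.Set.inter ((cycles.map (fun c => PySem.Set.ofList c)).getD v [])
          ((cycles.map (fun c => PySem.Set.ofList c)).getD u []) = [])) with hwi
      set out0 : List Int := List.replicate (max wo.length (wi.length + 1)) 0 with hout0
      have hout0len : out0.length = max wo.length (wi.length + 1) := by
        rw [hout0, List.length_replicate]
      have hout0get : ∀ j, out0.getD j 0 = 0 := by
        intro j
        rw [hout0]
        rcases Nat.lt_or_ge j (max wo.length (wi.length + 1)) with h | h
        · rw [List.getD_eq_getElem _ _ (by simpa using h)]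
          exact List.getElem_replicate ..
        · exact List.getD_eq_default _ _ (by simpa using h)
      have h0 := pvFold_add wo 0 0 out0 (by omega)
      simp only [Nat.add_zero, Nat.zero_add] at h0
      obtain ⟨h0len, h0get⟩ := h0
      set out1 := wo.zipIdx.foldl (fun o cz => o.set cz.2 (o.getD cz.2 0 + cz.1)) out0 with hout1
      have h1 := pvFold_add wi 1 0 out1 (by rw [h0len, hout0len]; omega)
      simp only [Nat.zero_add] at h1
      obtain ⟨h1len, h1get⟩ := h1
      refine ⟨?_, ?_, ?_⟩
      · rw [h1len, h0len, hout0len]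
        omega
      · rw [h1len, h0len, hout0len]
        have hk := List.length_filter_le (fun u =>
              decide (PySem.Set.inter ((cycles.map (fun c => PySem.Set.ofList c)).getD v [])
                ((cycles.map (fun c => PySem.Set.ofList c)).getD u []) = [])) rest
        simp only [List.length_cons]
        omega
      · intro k
        rw [h1get k, h0get k, hout0get k]
        cases k with
        | zero =>
          rw [pvCnt_zero]
          simp only [Nat.sub_zero, Nat.zero_add, zero_add, Nat.le_refl, true_and]
          split_ifs with hc0 hc1 hc1 <;>
            first | omega | (rw [hwog 0, pvCnt_zero]; omega)
        | succ k =>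
          rw [pvCnt_cons, ← hkeq]
          push_cast
          rw [← hwog (k + 1), ← hwig k]
          simp only [Nat.sub_zero, Nat.zero_add, Nat.add_sub_cancel, zero_add, true_and,
            Nat.le_add_left, le_add_iff_nonneg_left, Nat.zero_le, Nat.le_refl]
          split_ifs with hc0 hc1 hc1
          · omega
          · have hz : wi.getD k 0 = 0 := List.getD_eq_default _ _ (by omega)
            omega
          · have hz : wo.getD (k + 1) 0 = 0 := List.getD_eq_default _ _ (by omega)
            omega
          · have hz1 : wo.getD (k + 1) 0 = 0 := List.getD_eq_default _ _ (by omega)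
            have hz2 : wi.getD k 0 = 0 := List.getD_eq_default _ _ (by omega)
            omega

lemma pvGetD_pad (xs : List Int) (m i : Nat) :
    (xs ++ List.replicate m (0 : Int)).getD i 0 = xs.getD i 0 := by
  rcases Nat.lt_or_ge i xs.length with h | h
  · rw [List.getD_eq_getElem _ _ (by rw [List.length_append]; omega), List.getD_eq_getElem _ _ h]
    simp [List.getElem_append, h]
  · rw [List.getD_eq_default _ _ h]
    rcases Nat.lt_or_ge i (xs.length + m) with h2 | h2
    · rw [List.getD_eq_getElem _ _ (by simp; omega), List.getElem_append_right (by omega)]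
      simp
    · rw [List.getD_eq_default _ _ (by simp; omega)]

-- ===== VERDICT (by name: the statement is the Claim_ definition above) =====
theorem independence_poly_mod_spec : Claim_equal_independence_poly_mod := by
  intro cycles p _ _
  unfold Spec_independence_poly_mod
  simp only [independence_poly_mod, independence_poly_mod_alt]
  by_cases h0 : cycles.length = 0
  · simp [h0]
  · rw [if_neg h0, if_neg h0]
    by_cases h20 : cycles.length ≤ 20
    · rw [if_pos h20, if_neg (by omega)]
      congr 1
      obtain ⟨hal, hag⟩ := pvCountIK_spec cycles cycles.length
      obtain ⟨hb1, hb2, hbg⟩ := pvPolyB_spec cycles (List.range cycles.length)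
      rw [List.length_range] at hb2
      apply List.ext_getElem
      · rw [hal, List.length_append, List.length_replicate]
        omega
      · intro i h1 h2
        rw [← List.getD_eq_getElem _ 0 h1, ← List.getD_eq_getElem _ 0 h2, pvGetD_pad,
          hag i (by rw [hal] at h1; omega), hbg i]
    · rw [if_neg h20, if_pos (by omega)]
      rw [show (List.replicate (cycles.length + 1) (0 : Int)).set 0 1
          = 1 :: List.replicate cycles.length 0 by rw [List.replicate_succ]; rfl]
      simp
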